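-- pv_equiv track=rewrite | github.com/pmesgari/adventofcodde | 2024/day9.py | find_slice
-- ===== SOURCE A (Python) =====
-- from typing import List
--
-- def find_slice(disk_map: List[str], filesize: int):
--     """Find a free space that fits the given filesize"""
--     start = 0
--     size = 0
--     while True:
--         if start >= len(disk_map):
--             return None
--         if disk_map[start] != ".":
--             start += 1
--             continue
--         size = 0
--         while True:
--             if start + size >= len(disk_map):
--                 break
--             if disk_map[start + size] != ".":
--                 break
--             size += 1
--         if filesize <= size:
--             return start
--         start += size
-- ===== SOURCE B (Python) =====
-- def find_slice(disk_map, filesize):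
--     """Find a free space that fits the given filesize"""
--     count = 0
--     run_start = 0
--     for i, cell in enumerate(disk_map):
--         if cell == ".":
--             if count == 0:
--                 run_start = i
--             count += 1
--             if count >= filesize:
--                 return run_start
--         else:
--             count = 0
--     return None
-- ===== Notes on version B (the rewrite author's own statement) =====
-- stated objective: simpler
-- what changed: Replaced the nested while loops (outer scan plus inner run-measuring loop with a start += size skip) by one flat pass with a free-run counter and recorded run start, returning as soon as enough contiguous free cells are seen.
import Mathlib
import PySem

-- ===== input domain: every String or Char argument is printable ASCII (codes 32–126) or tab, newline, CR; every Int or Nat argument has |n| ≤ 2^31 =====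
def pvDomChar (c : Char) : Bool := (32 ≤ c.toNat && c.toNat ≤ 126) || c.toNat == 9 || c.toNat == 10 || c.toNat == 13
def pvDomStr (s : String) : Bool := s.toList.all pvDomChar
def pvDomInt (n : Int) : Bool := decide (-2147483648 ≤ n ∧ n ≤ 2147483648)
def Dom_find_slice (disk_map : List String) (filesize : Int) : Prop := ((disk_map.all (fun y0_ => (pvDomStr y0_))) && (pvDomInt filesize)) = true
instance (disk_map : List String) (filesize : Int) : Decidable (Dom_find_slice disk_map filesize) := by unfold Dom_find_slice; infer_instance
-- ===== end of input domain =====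

-- B replaces A's nested while loops by one flat pass with a free-run counter; same result, no speed claim.

-- ===== PORT A =====
-- inner 'while True' of A, viewed over the suffix disk_map[start+size:]: break past the end,
-- break on a non-'.' cell, else size += 1 — the same iterations over the same cells
def pvRunLen (cells : List String) (size : Nat) : Nat :=
  match cells with
  | [] => size
  | c :: rest => if c ≠ "." then size else pvRunLen rest (size + 1)

-- outer 'while True' of A over the suffix disk_map[start:]; 'start += size' is realised as
-- 'size - 1' further unit steps via the skip counter, so the recursion is structural —
-- the loop visits the same states and returns at the same points as the Python
def pvLoopA (filesize : Int) (cells : List String) (start : Nat) (skip : Nat) : Option Int :=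
  match cells with
  | [] => none
  | c :: rest =>
    match skip with
    | k + 1 => pvLoopA filesize rest (start + 1) k
    | 0 =>
      if c ≠ "." then pvLoopA filesize rest (start + 1) 0
      else
        let size := pvRunLen (c :: rest) 0
        if filesize ≤ (size : Int) then some (start : Int)
        else pvLoopA filesize rest (start + 1) (size - 1)

def find_slice (disk_map : List String) (filesize : Int) : Option Int :=
  pvLoopA filesize disk_map 0 0

-- ===== PORT B =====
-- one pass: cells with index i, running free count, recorded run_start
def pvLoopB (filesize : Int) (cells : List String) (i : Nat) (count run_start : Int) : Option Int :=
  match cells with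
  | [] => none
  | c :: rest =>
    if c = "." then
      let rs := if count = 0 then (i : Int) else run_start
      let cnt := count + 1
      if filesize ≤ cnt then some rs
      else pvLoopB filesize rest (i + 1) cnt rs
    else pvLoopB filesize rest (i + 1) 0 run_start

def find_slice_alt (disk_map : List String) (filesize : Int) : Option Int :=
  pvLoopB filesize disk_map 0 0 0

-- ===== PRECONDITION & SPEC =====
def Spec_find_slice (disk_map : List String) (filesize : Int) (out : Option Int) : Prop := out = find_slice_alt disk_map filesize
instance (disk_map : List String) (filesize : Int) (out : Option Int) : Decidable (Spec_find_slice disk_map filesize out) := by unfold Spec_find_slice; infer_instance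

-- ===== CLAIM (what is proved, stated in full; the proofs are below) =====
def Claim_equal_find_slice : Prop := ∀ (disk_map : List String) (filesize : Int), Dom_find_slice disk_map filesize → Spec_find_slice disk_map filesize (find_slice disk_map filesize)

-- ===== LEMMAS AND PROOFS =====

-- the inner loop's accumulator: measuring from s is s plus the leading-dot count
theorem pvRunLen_acc (cells : List String) : ∀ s, pvRunLen cells s = s + pvRunLen cells 0 := by
  induction cells with
  | nil => intro s; simp [pvRunLen]
  | cons c rest ih =>
    intro s
    by_cases hc : c = "."
    · simp only [pvRunLen, hc, ne_eq, not_true_eq_false, if_false]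
      rw [ih (s + 1), ih 1]; omega
    · simp [pvRunLen, hc]

theorem pvRunLen_le_length (cells : List String) : pvRunLen cells 0 ≤ cells.length := by
  induction cells with
  | nil => simp [pvRunLen]
  | cons c rest ih =>
    by_cases hc : c = "."
    · simp only [pvRunLen, hc, ne_eq, not_true_eq_false, if_false, List.length_cons]
      rw [pvRunLen_acc rest 1]; omega
    · simp [pvRunLen, hc]

-- a pending skip of k is a jump over k cells
theorem pvLoopA_skip (filesize : Int) :
    ∀ (cells : List String) (k start : Nat),
    pvLoopA filesize cells start k = pvLoopA filesize (cells.drop k) (start + min k cells.length) 0 := by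
  intro cells
  induction cells with
  | nil => intro k start; cases k <;> simp [pvLoopA]
  | cons c rest ih =>
    intro k start
    cases k with
    | zero => simp
    | succ k =>
      show pvLoopA filesize rest (start + 1) k = _
      rw [ih k (start + 1), List.drop_succ_cons,
        show start + 1 + min k rest.length = start + min (k + 1) (c :: rest).length by
          simp [List.length_cons]; omega]

-- B's traversal of the leading dots of cells, entered mid-run with count c (1 ≤ c < filesize)
theorem pvLoopB_run (filesize : Int) :
    ∀ (cells : List String) (i : Nat) (c rs : Int), 1 ≤ c → c < filesize →
    pvLoopB filesize cells i c rs =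
      if filesize ≤ c + pvRunLen cells 0 then some rs
      else pvLoopB filesize (cells.drop (pvRunLen cells 0)) (i + pvRunLen cells 0) 0 rs := by
  intro cells
  induction cells with
  | nil =>
    intro i c rs hc hcf
    rw [if_neg (by simp [pvRunLen]; omega)]
    simp [pvRunLen, pvLoopB]
  | cons x rest ih =>
    intro i c rs hc hcf
    by_cases hx : x = "."
    · have hL : pvRunLen (x :: rest) 0 = 1 + pvRunLen rest 0 := by
        simp only [pvRunLen, hx, ne_eq, not_true_eq_false, if_false]
        exact pvRunLen_acc rest 1
      rw [hL]
      show (if x = "." then _ else _) = _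
      rw [if_pos hx, if_neg (show ¬ c = 0 by omega)]
      by_cases hfit : filesize ≤ c + 1
      · rw [if_pos hfit, if_pos (by push_cast; omega)]
      · rw [if_neg hfit, ih (i + 1) (c + 1) rs (by omega) (by omega)]
        rw [show c + 1 + ((pvRunLen rest 0 : Nat) : Int) = c + ((1 + pvRunLen rest 0 : Nat) : Int) by push_cast; ring]
        rw [show (x :: rest).drop (1 + pvRunLen rest 0) = rest.drop (pvRunLen rest 0) by
             rw [Nat.add_comm, List.drop_succ_cons]]
        rw [show i + 1 + pvRunLen rest 0 = i + (1 + pvRunLen rest 0) by omega]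
    · have hL : pvRunLen (x :: rest) 0 = 0 := by simp [pvRunLen, hx]
      rw [hL]
      rw [if_neg (by push_cast; omega)]
      simp only [List.drop_zero, Nat.add_zero, pvLoopB]
      rw [if_neg hx, if_neg hx]

-- main bridge: A's outer loop with no pending skip equals B's pass, on any suffix, for any run_start
theorem pvMain (filesize : Int) :
    ∀ (n : Nat) (cells : List String) (start : Nat) (rs : Int), cells.length ≤ n →
    pvLoopA filesize cells start 0 = pvLoopB filesize cells start 0 rs := by
  intro n
  induction n with
  | zero =>
    intro cells start rs hn
    have h0 : cells = [] := List.length_eq_zero_iff.mp (by omega)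
    subst h0
    simp [pvLoopA, pvLoopB]
  | succ n ih =>
    intro cells start rs hn
    match cells with
    | [] => simp [pvLoopA, pvLoopB]
    | c :: rest =>
      by_cases hc : c = "."
      · have hL : pvRunLen (c :: rest) 0 = 1 + pvRunLen rest 0 := by
          simp only [pvRunLen, hc, ne_eq, not_true_eq_false, if_false]
          exact pvRunLen_acc rest 1
        show (if c ≠ "." then _ else _) = (if c = "." then _ else _)
        rw [if_neg (by simp [hc]), if_pos hc, if_pos rfl]
        simp only [zero_add]
        rw [hL]
        by_cases hfit1 : filesize ≤ (1 : Int)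
        · rw [if_pos hfit1, if_pos (by push_cast; omega)]
        · rw [if_neg hfit1]
          rw [pvLoopB_run filesize rest (start + 1) 1 (start : Int) (le_refl 1) (by omega)]
          rw [show (1 : Int) + ((pvRunLen rest 0 : Nat) : Int) = ((1 + pvRunLen rest 0 : Nat) : Int) by push_cast; ring]
          by_cases hfit : filesize ≤ ((1 + pvRunLen rest 0 : Nat) : Int)
          · rw [if_pos hfit, if_pos hfit]
          · rw [if_neg hfit, if_neg hfit]
            rw [show (1 + pvRunLen rest 0) - 1 = pvRunLen rest 0 by omega]
            rw [pvLoopA_skip filesize rest (pvRunLen rest 0) (start + 1)]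
            rw [Nat.min_eq_left (pvRunLen_le_length rest)]
            have hlen : (rest.drop (pvRunLen rest 0)).length ≤ n := by
              simp only [List.length_drop]
              have := hn; simp only [List.length_cons] at this; omega
            exact ih (rest.drop (pvRunLen rest 0)) (start + 1 + pvRunLen rest 0) (start : Int) hlen
      · show (if c ≠ "." then _ else _) = (if c = "." then _ else _)
        rw [if_pos hc, if_neg hc]
        exact ih rest (start + 1) rs (by simp at hn ⊢; omega)

-- ===== VERDICT (by name: the statement is the Claim_ definition above) =====
theorem find_slice_spec : Claim_equal_find_slice := by
  intro dm fs _
  unfold Spec_find_slice find_slice find_slice_alt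
  exact pvMain fs dm.length dm 0 0 (le_refl _)
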